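-- pv_equiv track=rewrite | github.com/bcara98/python-bnf-projects | sw_align.py | format_alignment
-- ===== SOURCE A (Python) =====
-- def format_alignment(alignment):
--     seq1_format = ''
--     seq2_format = ''
--     align_notation = ''
--     #scan from the of the alignment list towards the begining
--     for i in range(len(alignment[0])-1,-1,-1):
--         seq1_format += alignment[0][i][0] #stores the first sequence with the gaps
--         align_notation += alignment[0][i][1] #stores the matching '|' and mismathcing '*' character accordingly
--         seq2_format += alignment[0][i][2] #stores the second sequence with the gaps
--
--     formated = seq1_format+'\n'+align_notation+'\n'+seq2_format #concatenates the 3 generated strings by separating them with a new line character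
--     return formated
-- ===== SOURCE B (Python) =====
-- def format_alignment(alignment):
--     cols = alignment[0][::-1]
--     return '\n'.join(''.join(col[i] for col in cols) for i in range(3))
-- ===== Notes on version B (the rewrite author's own statement) =====
-- stated objective: idiomatic
-- what changed: Replaces the reversed-index loop accumulating three strings with a transpose-style decomposition: reverse the column list once, then build each of the three lines with a join and join the lines with newlines.
import Mathlib
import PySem

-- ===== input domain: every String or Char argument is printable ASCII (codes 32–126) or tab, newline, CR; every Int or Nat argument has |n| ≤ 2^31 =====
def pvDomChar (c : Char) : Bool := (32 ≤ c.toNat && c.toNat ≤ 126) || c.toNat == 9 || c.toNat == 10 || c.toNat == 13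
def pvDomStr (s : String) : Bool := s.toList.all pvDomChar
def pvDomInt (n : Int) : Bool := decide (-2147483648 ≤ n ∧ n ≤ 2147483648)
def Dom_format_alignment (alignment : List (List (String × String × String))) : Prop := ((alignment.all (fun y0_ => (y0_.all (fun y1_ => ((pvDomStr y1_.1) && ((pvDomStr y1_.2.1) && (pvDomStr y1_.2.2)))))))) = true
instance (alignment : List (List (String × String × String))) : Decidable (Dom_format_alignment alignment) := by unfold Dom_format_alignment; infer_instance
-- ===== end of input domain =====

-- B reverses the column list once and builds each of the three lines with a join (a transpose-style
-- decomposition) instead of A's reversed-index loop accumulating three strings; idiomatic, same cost.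


-- ===== PORT A =====
-- alignment[0]: IndexError on empty list; Pre_ excludes alignment = [], so the [] default is never used.
-- The loop indices produced by range(len-1,-1,-1) are always in range, so the ("","","") default of
-- pyGetD is never used either.
def format_alignment (alignment : List (List (String × String × String))) : String :=
  let row := PySem.List.pyGetD alignment 0 []
  let s := (PySem.List.pyRange ((row.length : Int) - 1) (-1) (-1)).foldl
    (fun (acc : String × String × String) i =>
      let t := PySem.List.pyGetD row i ("", "", "")
      (acc.1 ++ t.1, acc.2.1 ++ t.2.1, acc.2.2 ++ t.2.2)) ("", "", "")
  s.1 ++ "\n" ++ s.2.1 ++ "\n" ++ s.2.2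

-- ===== PORT B =====
def format_alignment_alt (alignment : List (List (String × String × String))) : String :=
  let cols := (PySem.List.pyGetD alignment 0 []).reverse
  String.intercalate "\n"
    [String.join (cols.map (·.1)), String.join (cols.map (·.2.1)), String.join (cols.map (·.2.2))]

-- ===== PRECONDITION & SPEC =====
-- A evaluates alignment[0]; on the empty outer list it raises IndexError, so such inputs are excluded.
def Pre_format_alignment (alignment : List (List (String × String × String))) : Prop := alignment ≠ []
instance (alignment : List (List (String × String × String))) : Decidable (Pre_format_alignment alignment) := by unfold Pre_format_alignment; infer_instance
def pvWitness_format_alignment : (List (List (String × String × String))) := [[("A", "|", "A"), ("B", "*", "C")]]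
def Spec_format_alignment (alignment : List (List (String × String × String))) (out : String) : Prop := out = format_alignment_alt alignment
instance (alignment : List (List (String × String × String))) (out : String) : Decidable (Spec_format_alignment alignment out) := by unfold Spec_format_alignment; infer_instance

-- ===== CLAIM (what is proved, stated in full; the proofs are below) =====
def Claim_equal_format_alignment : Prop := ∀ (alignment : List (List (String × String × String))), Dom_format_alignment alignment → Pre_format_alignment alignment → Spec_format_alignment alignment (format_alignment alignment)

-- ===== LEMMAS AND PROOFS =====

-- A's loop index list, mapped through the (total) element read, is exactly the reversed row.
theorem pv_indices_eq_reverse (row : List (String × String × String)) :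
    (PySem.List.pyRange ((row.length : Int) - 1) (-1) (-1)).map
      (fun i => PySem.List.pyGetD row i ("", "", "")) = row.reverse := by
  have h : PySem.List.pyRange ((row.length : Int) - 1) (-1) (-1)
      = (PySem.List.pyRange 0 (row.length : Int) 1).reverse := by
    have := PySem.List.pyRange_neg_one_eq_reverse ((row.length : Int) - 1) (-1)
    simpa using this
  rw [h, List.map_reverse, PySem.List.map_pyGetD_pyRange_zero']

-- A's fold over the countdown index range is the same fold over the reversed row itself.
theorem pv_fold_indices (row : List (String × String × String)) :
    (PySem.List.pyRange ((row.length : Int) - 1) (-1) (-1)).foldl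
      (fun (acc : String × String × String) i =>
        let t := PySem.List.pyGetD row i ("", "", "")
        (acc.1 ++ t.1, acc.2.1 ++ t.2.1, acc.2.2 ++ t.2.2)) ("", "", "")
    = row.reverse.foldl (fun (acc : String × String × String) t =>
        (acc.1 ++ t.1, acc.2.1 ++ t.2.1, acc.2.2 ++ t.2.2)) ("", "", "") := by
  rw [← pv_indices_eq_reverse row, List.foldl_map]

-- An accumulator can be pulled out in front of a string-append fold.
theorem pv_foldl_pull (f : (String × String × String) → String)
    (xs : List (String × String × String)) (s : String) :
    xs.foldl (fun x y => x ++ f y) s = s ++ xs.foldl (fun x y => x ++ f y) "" := by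
  induction xs generalizing s with
  | nil => simp
  | cons x xs ih =>
      simp only [List.foldl_cons]
      rw [ih (s ++ f x), ih ("" ++ f x)]
      simp [String.append_assoc]

-- Folding the three-way append over a list equals the three joins, with the accumulator in front.
theorem pv_fold_join (l : List (String × String × String)) (a b c : String) :
    (l.foldl (fun (acc : String × String × String) t =>
        (acc.1 ++ t.1, acc.2.1 ++ t.2.1, acc.2.2 ++ t.2.2)) (a, b, c))
    = (a ++ String.join (l.map (·.1)), b ++ String.join (l.map (·.2.1)),
       c ++ String.join (l.map (·.2.2))) := by
  induction l generalizing a b c with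
  | nil => simp [String.join]
  | cons x xs ih =>
      simp only [List.foldl_cons, List.map_cons, String.join, List.foldl_map] at *
      rw [ih]
      simp only [Prod.mk.injEq]
      refine ⟨?_, ?_, ?_⟩ <;>
        simpa [String.append_assoc] using
          (pv_foldl_pull _ xs _).symm

-- Joining three lines with '\n' unfolds by computation.
theorem pv_intercalate3 (a b c : String) :
    String.intercalate "\n" [a, b, c] = a ++ "\n" ++ b ++ "\n" ++ c := rfl

-- ===== VERDICT (by name: the statement is the Claim_ definition above) =====
theorem format_alignment_spec : Claim_equal_format_alignment := by
  intro alignment _ _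
  unfold Spec_format_alignment
  simp only [format_alignment, format_alignment_alt]
  rw [pv_fold_indices, pv_fold_join, pv_intercalate3]
  simp [String.append_assoc]
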